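-- pv_equiv track=rewrite | github.com/AmyLi98/Cryptography-Website | cryptography_library/rsa.py | number_into_block
-- ===== SOURCE A (Python) =====
-- def number_into_block(list_number, blockbit):
--     list_number_blocked = []
--     list1 = []
--     for i in range(0, len(list_number), blockbit):
--         list1.append(list_number[i:i + blockbit])
--     zeronum = blockbit - len(list1[len(list1) - 1])
--     while len(list1[len(list1)-1]) < blockbit:
--         list1[len(list1)-1].append(0)
--     for i in range(0, len(list1)):
--         a = 0
--         for j in range(0, len(list1[i])):
--             a = a + 2 ** (blockbit - 1 - j) * list1[i][j]
--         list_number_blocked.append(a)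
--     return list_number_blocked, zeronum
-- ===== SOURCE B (Python) =====
-- def number_into_block(list_number, blockbit):
--     # One pass, Horner's rule: a = a*2 + bit, emit when a block is full.
--     out = []
--     a = 0
--     k = 0
--     for x in list_number:
--         a = a * 2 + x
--         k += 1
--         if k == blockbit:
--             out.append(a)
--             a = 0
--             k = 0
--     zeronum = 0
--     if k:
--         zeronum = blockbit - k
--         out.append(a * 2 ** zeronum)
--     return out, zeronum
-- ===== Notes on version B (the rewrite author's own statement) =====
-- stated objective: faster
-- what changed: Single left-to-right pass using Horner's rule (a = a*2 + bit) with a block counter, instead of first building a list of slices, padding the last one, and then for each block recomputing 2**(blockbit-1-j) for every bit.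
import Mathlib
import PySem

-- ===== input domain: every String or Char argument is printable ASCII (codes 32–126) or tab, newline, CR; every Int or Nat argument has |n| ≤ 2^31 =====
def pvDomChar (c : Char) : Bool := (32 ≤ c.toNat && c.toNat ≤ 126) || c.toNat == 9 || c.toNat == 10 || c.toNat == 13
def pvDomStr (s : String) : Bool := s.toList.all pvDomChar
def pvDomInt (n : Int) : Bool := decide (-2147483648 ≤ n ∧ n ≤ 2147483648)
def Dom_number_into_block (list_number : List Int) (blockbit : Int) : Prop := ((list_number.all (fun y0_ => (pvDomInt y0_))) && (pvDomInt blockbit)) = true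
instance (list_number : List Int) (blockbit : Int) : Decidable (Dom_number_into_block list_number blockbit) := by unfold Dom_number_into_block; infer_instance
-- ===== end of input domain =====

-- B replaces A's slice-pad-and-powers pass with a single Horner pass (a = a*2 + bit); equal return value on Pre_.

-- ===== PORT A =====
-- helper for A's 'while len(list1[-1]) < blockbit: list1[-1].append(0)' loop
def pvPad (blockbit : Int) (blk : List Int) : List Int :=
  if (blk.length : Int) < blockbit then pvPad blockbit (blk ++ [0]) else blk
termination_by (blockbit - blk.length).toNat
decreasing_by simp only [List.length_append, List.length_cons, List.length_nil]; omega

def number_into_block (list_number : List Int) (blockbit : Int) : List Int × Int :=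
  -- for i in range(0, len(list_number), blockbit): list1.append(list_number[i:i+blockbit])
  let list1 : List (List Int) :=
    (PySem.List.pyRange 0 (list_number.length : Int) blockbit).foldl
      (fun acc i => acc ++ [PySem.List.slice list_number (some i) (some (i + blockbit))]) []
  -- list1[len(list1) - 1]; Pre_ guarantees list1 ≠ [] (otherwise Python raises IndexError)
  let last := PySem.List.pyGetD list1 ((list1.length : Int) - 1) []
  let zeronum := blockbit - (last.length : Int)
  -- the while loop mutates list1's last element in place
  let list1' := PySem.List.pySetD list1 ((list1.length : Int) - 1) (pvPad blockbit last)
  -- for i in range(0, len(list1)): a = 0; for j in range(0, len(list1[i])): a += 2**(blockbit-1-j)*list1[i][j]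
  -- exponent as .toNat: exact under Pre_, where every block has length blockbit so blockbit-1-j ≥ 0
  let blocked :=
    (PySem.List.pyRange 0 (list1'.length : Int) 1).foldl
      (fun acc i =>
        let blk := PySem.List.pyGetD list1' i []
        acc ++ [(PySem.List.pyRange 0 (blk.length : Int) 1).foldl
          (fun a j => a + 2 ^ (blockbit - 1 - j).toNat * PySem.List.pyGetD blk j 0) 0])
      []
  (blocked, zeronum)

-- ===== PORT B =====
def number_into_block_alt (list_number : List Int) (blockbit : Int) : List Int × Int :=
  let st := list_number.foldl
    (fun (st : List Int × Int × Int) x =>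
      let a := st.2.1 * 2 + x
      let k := st.2.2 + 1
      if k = blockbit then (st.1 ++ [a], 0, 0) else (st.1, a, k))
    ([], 0, 0)
  -- 2 ** zeronum with zeronum = blockbit - k ≥ 0 whenever k ≠ 0 under Pre_; .toNat is exact there
  if st.2.2 ≠ 0 then (st.1 ++ [st.2.1 * 2 ^ (blockbit - st.2.2).toNat], blockbit - st.2.2)
  else (st.1, 0)

-- ===== PRECONDITION & SPEC =====
-- Pre_ excludes exactly the inputs where A raises: blockbit ≤ 0 (ValueError/IndexError from range/indexing)
-- and empty list_number (IndexError on list1[-1]).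
def Pre_number_into_block (list_number : List Int) (blockbit : Int) : Prop :=
  1 ≤ blockbit ∧ list_number ≠ []
instance (list_number : List Int) (blockbit : Int) : Decidable (Pre_number_into_block list_number blockbit) := by unfold Pre_number_into_block; infer_instance

def pvWitness_number_into_block : List Int × Int := ([1, 0, 1, 1, 0], 3)

def Spec_number_into_block (list_number : List Int) (blockbit : Int) (out : List Int × Int) : Prop := out = number_into_block_alt list_number blockbit
instance (list_number : List Int) (blockbit : Int) (out : List Int × Int) : Decidable (Spec_number_into_block list_number blockbit out) := by unfold Spec_number_into_block; infer_instance

-- ===== CLAIM (what is proved, stated in full; the proofs are below) =====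
def Claim_equal_number_into_block : Prop := ∀ (list_number : List Int) (blockbit : Int), Dom_number_into_block list_number blockbit → Pre_number_into_block list_number blockbit → Spec_number_into_block list_number blockbit (number_into_block list_number blockbit)

-- ===== LEMMAS AND PROOFS =====

-- Horner evaluation with accumulator (B's loop body on one block)
def pvHorner (a : Int) (c : List Int) : Int := c.foldl (fun a x => a * 2 + x) a

-- the blocks A's first loop builds, recursively
def pvChunks (b : Int) (l : List Int) : List (List Int) :=
  if l = [] then [] else
  if b ≤ 0 then [] else
  l.take b.toNat :: pvChunks b (l.drop b.toNat)
termination_by l.length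
decreasing_by
  rename_i h1 h2
  simp only [List.length_drop]
  cases l with
  | nil => exact absurd rfl h1
  | cons x xs => simp only [List.length_cons]; omega

-- the common specification both ports are reduced to
def pvSpec (b : Int) (l : List Int) : List Int × Int :=
  if l = [] then ([], 0) else
  if b ≤ 0 then ([], 0) else
  if (l.length : Int) < b then ([pvHorner 0 l * 2 ^ (b - l.length).toNat], b - (l.length : Int)) else
  if (l.length : Int) = b then ([pvHorner 0 l], 0) else
  let r := pvSpec b (l.drop b.toNat)
  (pvHorner 0 (l.take b.toNat) :: r.1, r.2)
termination_by l.length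
decreasing_by
  rename_i h1 h2 _ _
  simp only [List.length_drop]
  cases l with
  | nil => exact absurd rfl h1
  | cons x xs => simp only [List.length_cons]; omega

-- B's loop body, named for the proofs (definitionally the lambda in the port)
def pvStepB (blockbit : Int) (st : List Int × Int × Int) (x : Int) : List Int × Int × Int :=
  let a := st.2.1 * 2 + x
  let k := st.2.2 + 1
  if k = blockbit then (st.1 ++ [a], 0, 0) else (st.1, a, k)

lemma pvHorner_cons (a x : Int) (c : List Int) : pvHorner a (x :: c) = pvHorner (a * 2 + x) c := rfl

lemma pvHorner_append (a : Int) (c d : List Int) : pvHorner a (c ++ d) = pvHorner (pvHorner a c) d := by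
  simp [pvHorner, List.foldl_append]

lemma pvHorner_zeros (a : Int) (z : Nat) : pvHorner a (List.replicate z 0) = a * 2 ^ z := by
  induction z generalizing a with
  | zero => simp [pvHorner]
  | succ n ih => rw [List.replicate_succ, pvHorner_cons, ih]; ring

lemma pvPad_eq (b : Int) (blk : List Int) : pvPad b blk = blk ++ List.replicate (b - blk.length).toNat 0 := by
  generalize hn : (b - (blk.length : Int)).toNat = n
  induction n generalizing blk with
  | zero =>
    rw [pvPad, if_neg (by omega)]
    simp
  | succ m ih =>
    rw [pvPad, if_pos (by omega)]
    rw [ih (blk ++ [0]) (by simp only [List.length_append, List.length_cons, List.length_nil]; omega)]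
    simp [List.replicate_succ]

lemma pvRange_pos_nil (a c s : Int) (hs : 0 < s) (h : c ≤ a) : PySem.List.pyRange a c s = [] := by
  rw [PySem.List.pyRange_of_pos a c hs]
  simp [show ¬ a < c by omega]

lemma pvRange_pos_cons (a c s : Int) (hs : 0 < s) (h : a < c) :
    PySem.List.pyRange a c s = a :: PySem.List.pyRange (a + s) c s := by
  rw [PySem.List.pyRange_of_pos a c hs, PySem.List.pyRange_of_pos (a + s) c hs]
  have hq0 : 0 ≤ (c - a - 1) / s := Int.ediv_nonneg (by omega) (by omega)
  have h2 : (c - a + s - 1) / s = (c - a - 1) / s + 1 := by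
    rw [show c - a + s - 1 = (c - a - 1) + 1 * s by ring, Int.add_mul_ediv_right _ _ (by omega)]
  rw [if_pos h]
  have hn1 : ((c - a + s - 1) / s).toNat = ((c - a - 1) / s).toNat + 1 := by omega
  rw [hn1, List.range_succ_eq_map]
  by_cases hc : a + s < c
  · rw [if_pos hc, show c - (a + s) + s - 1 = c - a - 1 by ring]
    simp only [List.map_cons, List.map_map, Nat.cast_zero, mul_zero, add_zero]
    congr 1
    apply List.map_congr_left
    intro k _
    simp only [Function.comp_apply]
    push_cast
    ring
  · rw [if_neg hc]
    have hz : (c - a - 1) / s = 0 := Int.ediv_eq_zero_of_lt (by omega) (by omega)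
    rw [hz]
    simp

lemma pvRange_shift (a c s d : Int) (hs : 0 < s) :
    PySem.List.pyRange (a + d) (c + d) s = (PySem.List.pyRange a c s).map (· + d) := by
  rw [PySem.List.pyRange_of_pos _ _ hs, PySem.List.pyRange_of_pos a c hs]
  by_cases h : a < c
  · rw [if_pos (by omega), if_pos h, show c + d - (a + d) + s - 1 = c - a + s - 1 by ring, List.map_map]
    apply List.map_congr_left
    intro k _
    simp only [Function.comp_apply]
    ring
  · rw [if_neg (by omega), if_neg h]
    simp

lemma pvChunks_ne_nil (b : Int) (l : List Int) (hb : 0 < b) (hl : l ≠ []) : pvChunks b l ≠ [] := by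
  rw [pvChunks]; simp [hl, show ¬ b ≤ 0 by omega]

lemma pvChunks_len_le (b : Int) (hb : 0 < b) : ∀ (N : Nat) (l : List Int), l.length ≤ N →
    ∀ c ∈ pvChunks b l, c ≠ [] ∧ c.length ≤ b.toNat := by
  intro N
  induction N with
  | zero =>
    intro l hlen c hc
    have hl : l = [] := List.eq_nil_of_length_eq_zero (by omega)
    subst hl
    rw [pvChunks] at hc
    simp at hc
  | succ n ih =>
    intro l hlen c hc
    by_cases hl : l = []
    · subst hl; rw [pvChunks] at hc; simp at hc
    · rw [pvChunks, if_neg hl, if_neg (by omega)] at hc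
      rcases List.mem_cons.mp hc with h | h
      · subst h
        refine ⟨?_, by simp [List.length_take]⟩
        intro heq
        rcases List.take_eq_nil_iff.mp heq with h1 | h1
        · omega
        · exact hl h1
      · have hlpos : 0 < l.length := List.length_pos_of_ne_nil hl
        exact ih (l.drop b.toNat) (by simp only [List.length_drop]; omega) c h

lemma pvChunks_dropLast_full (b : Int) (hb : 0 < b) : ∀ (N : Nat) (l : List Int), l.length ≤ N →
    ∀ c ∈ (pvChunks b l).dropLast, c.length = b.toNat := by
  intro N
  induction N with
  | zero =>
    intro l hlen c hc
    have hl : l = [] := List.eq_nil_of_length_eq_zero (by omega)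
    subst hl
    rw [pvChunks] at hc
    simp at hc
  | succ n ih =>
    intro l hlen c hc
    by_cases hl : l = []
    · subst hl; rw [pvChunks] at hc; simp at hc
    · rw [pvChunks, if_neg hl, if_neg (by omega)] at hc
      by_cases hd : l.drop b.toNat = []
      · rw [hd, pvChunks] at hc
        simp at hc
      · have hne := pvChunks_ne_nil b (l.drop b.toNat) hb hd
        rw [List.dropLast_cons_of_ne_nil hne] at hc
        rcases List.mem_cons.mp hc with h | h
        · subst h
          have hgt : b.toNat < l.length := by
            by_contra hh
            push Not at hh
            exact hd (List.drop_eq_nil_of_le hh)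
          simp only [List.length_take]
          omega
        · have hlpos : 0 < l.length := List.length_pos_of_ne_nil hl
          exact ih (l.drop b.toNat) (by simp only [List.length_drop]; omega) c h

lemma pvMapSlice (b : Int) (hb : 0 < b) : ∀ (N : Nat) (l : List Int), l.length ≤ N →
    (PySem.List.pyRange 0 (l.length : Int) b).map
      (fun i => PySem.List.slice l (some i) (some (i + b))) = pvChunks b l := by
  intro N
  induction N with
  | zero =>
    intro l hlen
    have hl : l = [] := List.eq_nil_of_length_eq_zero (by omega)
    subst hl
    rw [pvChunks]
    simp only [List.length_nil, Nat.cast_zero]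
    rw [pvRange_pos_nil 0 0 b hb le_rfl]
    simp
  | succ n ih =>
    intro l hlen
    by_cases hl : l = []
    · subst hl
      rw [pvChunks]
      simp only [List.length_nil, Nat.cast_zero]
      rw [pvRange_pos_nil 0 0 b hb le_rfl]
      simp
    · have hlpos : 0 < l.length := List.length_pos_of_ne_nil hl
      rw [pvRange_pos_cons 0 (l.length : Int) b hb (by exact_mod_cast hlpos), List.map_cons]
      rw [pvChunks, if_neg hl, if_neg (by omega)]
      congr 1
      · rw [zero_add, PySem.List.slice_zero_start, PySem.List.slice_to _ (le_of_lt hb)]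
      · have hshift : PySem.List.pyRange (0 + b) ((l.length : Int) - b + b) b
            = (PySem.List.pyRange 0 ((l.length : Int) - b) b).map (· + b) :=
          pvRange_shift 0 ((l.length : Int) - b) b b hb
        rw [show (l.length : Int) - b + b = (l.length : Int) by ring] at hshift
        rw [hshift, List.map_map]
        by_cases hbig : b < (l.length : Int)
        · have hdlen : ((l.drop b.toNat).length : Int) = (l.length : Int) - b := by
            simp only [List.length_drop]
            omega
          rw [← ih (l.drop b.toNat) (by simp only [List.length_drop]; omega), hdlen]
          apply List.map_congr_left
          intro i hi
          have h0i : 0 ≤ i := ((PySem.List.mem_pyRange_iff_of_pos hb i).mp hi).1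
          simp only [Function.comp_apply]
          rw [PySem.List.slice_toNat _ (by omega) (by omega),
              PySem.List.slice_toNat _ (by omega) (by omega), List.drop_drop]
          congr 1
          · omega
          · congr 1
            omega
        · rw [pvRange_pos_nil 0 ((l.length : Int) - b) b hb (by omega)]
          rw [List.drop_eq_nil_of_le (by omega), pvChunks]
          simp

lemma pvSetLast {α : Type} : ∀ (cs : List α) (x : α), cs ≠ [] →
    cs.set (cs.length - 1) x = cs.dropLast ++ [x] := by
  intro cs x
  induction cs with
  | nil => intro h; exact absurd rfl h
  | cons c cs' ih =>
    intro _
    cases cs' with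
    | nil => rfl
    | cons d cs'' =>
      have ih' := ih (List.cons_ne_nil d cs'')
      rw [List.dropLast_cons_of_ne_nil (List.cons_ne_nil d cs'')]
      rw [show (c :: d :: cs'').length - 1 = ((d :: cs'').length - 1) + 1 by simp]
      rw [List.set_cons_succ, ih']
      rfl

lemma pvSum (blk : List Int) :
    ((List.range blk.length).map (fun k => 2 ^ (blk.length - 1 - k) * blk.getD k 0)).sum = pvHorner 0 blk := by
  induction blk using List.reverseRecOn with
  | nil => simp [pvHorner]
  | append_singleton c x ih =>
    rw [pvHorner_append]
    simp only [List.length_append, List.length_cons, List.length_nil]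
    rw [List.range_succ, List.map_append, List.sum_append]
    have hlast : (c ++ [x]).getD c.length 0 = x := by
      rw [List.getD_eq_getElem?_getD, List.getElem?_append_right le_rfl]
      simp
    have hstep : ∀ k ∈ List.range c.length,
        2 ^ (c.length + 1 - 1 - k) * (c ++ [x]).getD k 0
          = 2 * (2 ^ (c.length - 1 - k) * c.getD k 0) := by
      intro k hk
      rw [List.mem_range] at hk
      rw [List.getD_append _ _ _ _ hk]
      rw [show c.length + 1 - 1 - k = (c.length - 1 - k) + 1 by omega, pow_succ]
      ring
    rw [List.map_congr_left hstep]
    have hmul : ((List.range c.length).map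
        (fun k => 2 * (2 ^ (c.length - 1 - k) * c.getD k 0))).sum
          = 2 * ((List.range c.length).map (fun k => 2 ^ (c.length - 1 - k) * c.getD k 0)).sum := by
      rw [← List.sum_map_mul_left]
    rw [hmul, ih]
    simp only [List.map_cons, List.map_nil, List.sum_cons, List.sum_nil, hlast]
    simp [pvHorner]
    ring

lemma pvInner (b : Int) (blk : List Int) (hlen : (blk.length : Int) = b) :
    (PySem.List.pyRange 0 (blk.length : Int) 1).foldl
      (fun a j => a + 2 ^ (b - 1 - j).toNat * PySem.List.pyGetD blk j 0) 0 = pvHorner 0 blk := by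
  rw [PySem.List.pyRange_one]
  rw [List.foldl_map]
  have hfun : ∀ (a : Int) (k : Nat), k ∈ List.range ((blk.length : Int) - 0).toNat →
      a + 2 ^ (b - 1 - (0 + (k : Int))).toNat * PySem.List.pyGetD blk (0 + (k : Int)) 0
        = a + 2 ^ (blk.length - 1 - k) * blk.getD k 0 := by
    intro a k _
    rw [zero_add]
    rw [PySem.List.pyGetD_natCast]
    have he : (b - 1 - (k : Int)).toNat = blk.length - 1 - k := by omega
    rw [he]
  refine Eq.trans (PySem.List.foldl_congr_mem _ _
      (fun (a : Int) (k : Nat) => a + 2 ^ (blk.length - 1 - k) * blk.getD k 0) 0 hfun) ?_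
  rw [PySem.List.foldl_add (List.range ((blk.length : Int) - 0).toNat)
      (fun k => 2 ^ (blk.length - 1 - k) * blk.getD k 0) 0]
  rw [zero_add]
  simp only [sub_zero, Int.toNat_natCast]
  exact pvSum blk

-- A's value equals pvSpec, phrased on a decomposition of the chunk list
lemma pvA_chunks (b : Int) (hb : 0 < b) : ∀ (N : Nat) (l : List Int), l.length ≤ N → l ≠ [] →
    ∀ (cs' : List (List Int)) (lastC : List Int), pvChunks b l = cs' ++ [lastC] →
    ((cs'.map (pvHorner 0)) ++
       [pvHorner 0 (lastC ++ List.replicate (b - lastC.length).toNat 0)],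
     b - (lastC.length : Int)) = pvSpec b l := by
  intro N
  induction N with
  | zero =>
    intro l hlen hl
    exact absurd (List.eq_nil_of_length_eq_zero (by omega)) hl
  | succ n ih =>
    intro l hlen hl cs' lastC hdec
    have hlpos : 0 < l.length := List.length_pos_of_ne_nil hl
    rw [pvChunks, if_neg hl, if_neg (by omega)] at hdec
    by_cases hd : l.drop b.toNat = []
    · have hle : l.length ≤ b.toNat := by
        have := congrArg List.length hd
        simp only [List.length_drop, List.length_nil] at this
        omega
      have hnilc : pvChunks b ([] : List Int) = [] := by rw [pvChunks]; simp
      rw [hd, hnilc] at hdec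
      have htake : l.take b.toNat = l := List.take_of_length_le hle
      rw [htake] at hdec
      have hcs' : cs' = [] ∧ lastC = l := by
        cases cs' with
        | nil => simpa using hdec.symm
        | cons c cs'' =>
          exfalso
          have hlenx := congrArg List.length hdec
          simp only [List.length_cons, List.length_append, List.length_nil] at hlenx
          omega
      obtain ⟨h1, h2⟩ := hcs'
      subst h1
      rw [h2]
      simp only [List.map_nil, List.nil_append]
      by_cases hlt : (l.length : Int) < b
      · rw [pvSpec, if_neg hl, if_neg (by omega), if_pos hlt]
        rw [pvHorner_append, pvHorner_zeros]
      · have heq : (l.length : Int) = b := by omega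
        rw [pvSpec, if_neg hl, if_neg (by omega), if_neg hlt, if_pos heq]
        rw [show (b - (l.length : Int)).toNat = 0 by omega]
        simp only [List.replicate_zero, List.append_nil]
        rw [heq]
        simp
    · have hgt : b.toNat < l.length := by
        by_contra hh
        push Not at hh
        exact hd (List.drop_eq_nil_of_le hh)
      cases cs' with
      | nil =>
        exfalso
        simp only [List.nil_append] at hdec
        have := hdec.symm
        injection this with _ h2
        exact pvChunks_ne_nil b (l.drop b.toNat) hb hd h2.symm
      | cons c cs'' =>
        rw [List.cons_append] at hdec
        injection hdec with hc hrest
        have hih := ih (l.drop b.toNat) (by simp only [List.length_drop]; omega) hd cs'' lastC hrest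
        rw [pvSpec, if_neg hl, if_neg (by omega), if_neg (by omega), if_neg (by omega)]
        simp only [List.map_cons, List.cons_append]
        rw [← hih, hc]

-- 'for i in range(len(L)): … L[i] …' over the whole list is a map over the list
lemma pvMapGetD {β : Type} (L : List (List Int)) (F : List Int → β) :
    (PySem.List.pyRange 0 (L.length : Int) 1).map (fun i => F (PySem.List.pyGetD L i [])) = L.map F := by
  conv_rhs => rw [← PySem.List.map_pyGetD_pyRange_zero' L []]
  rw [List.map_map]
  rfl

lemma pvA_eq (l : List Int) (b : Int) (hb : 0 < b) (hl : l ≠ []) :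
    number_into_block l b = pvSpec b l := by
  simp only [number_into_block]
  rw [PySem.List.foldl_append_singleton_eq_map]
  rw [PySem.List.foldl_append_singleton_eq_map]
  simp only [List.nil_append]
  rw [pvMapSlice b hb l.length l le_rfl]
  have hcs : pvChunks b l ≠ [] := pvChunks_ne_nil b l hb hl
  have hlen1 : 0 < (pvChunks b l).length := List.length_pos_of_ne_nil hcs
  have hcast : ((pvChunks b l).length : Int) - 1 = (((pvChunks b l).length - 1 : Nat) : Int) := by omega
  rw [hcast, PySem.List.pyGetD_natCast, PySem.List.pySetD_natCast]
  rw [List.getD_eq_getElem _ _ (by omega), ← List.getLast_eq_getElem hcs]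
  rw [pvSetLast _ _ hcs]
  rw [pvMapGetD ((pvChunks b l).dropLast ++ [pvPad b ((pvChunks b l).getLast hcs)])
    (fun blk => (PySem.List.pyRange 0 (blk.length : Int) 1).foldl
      (fun a j => a + 2 ^ (b - 1 - j).toNat * PySem.List.pyGetD blk j 0) 0)]
  set lastC := (pvChunks b l).getLast hcs with hlastC
  have hlast_mem : lastC ∈ pvChunks b l := List.getLast_mem hcs
  have hlast_le : lastC.length ≤ b.toNat :=
    (pvChunks_len_le b hb l.length l le_rfl lastC hlast_mem).2
  have hpadlen : (pvPad b lastC).length = b.toNat := by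
    rw [pvPad_eq]
    simp only [List.length_append, List.length_replicate]
    omega
  have hmap : ((pvChunks b l).dropLast ++ [pvPad b lastC]).map
      (fun blk => (PySem.List.pyRange 0 (blk.length : Int) 1).foldl
        (fun a j => a + 2 ^ (b - 1 - j).toNat * PySem.List.pyGetD blk j 0) 0)
      = ((pvChunks b l).dropLast ++ [pvPad b lastC]).map (pvHorner 0) := by
    apply List.map_congr_left
    intro blk hblk
    rcases List.mem_append.mp hblk with h | h
    · exact pvInner b blk (by
        rw [pvChunks_dropLast_full b hb l.length l le_rfl blk h]
        omega)
    · rw [List.mem_singleton.mp h]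
      exact pvInner b (pvPad b lastC) (by rw [hpadlen]; omega)
  rw [hmap, List.map_append, List.map_singleton]
  rw [pvPad_eq]
  exact pvA_chunks b hb l.length l le_rfl hl (pvChunks b l).dropLast lastC
    (List.dropLast_append_getLast hcs).symm

-- B's loop characterisation
lemma pvFoldB_partial (b : Int) : ∀ (c : List Int) (out : List Int) (a k : Int), 0 ≤ k →
    k + (c.length : Int) < b →
    c.foldl (pvStepB b) (out, a, k) = (out, pvHorner a c, k + (c.length : Int)) := by
  intro c
  induction c with
  | nil =>
    intro out a k h0 hlt
    simp [pvHorner]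
  | cons x c' ih =>
    intro out a k h0 hlt
    simp only [List.length_cons] at hlt
    rw [List.foldl_cons]
    rw [show pvStepB b (out, a, k) x = (out, a * 2 + x, k + 1) by
      unfold pvStepB
      rw [if_neg (by push_cast at hlt ⊢; omega)]]
    rw [ih out (a * 2 + x) (k + 1) (by omega) (by push_cast at hlt ⊢; omega)]
    rw [pvHorner_cons]
    refine congrArg _ (congrArg _ ?_)
    simp only [List.length_cons]
    push_cast
    ring

lemma pvFoldB_full (b : Int) : ∀ (c rest out : List Int) (a k : Int), 0 ≤ k → k < b →
    k + (c.length : Int) = b →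
    (c ++ rest).foldl (pvStepB b) (out, a, k) = rest.foldl (pvStepB b) (out ++ [pvHorner a c], 0, 0) := by
  intro c
  induction c with
  | nil =>
    intro rest out a k h0 hkb heq
    exfalso
    simp at heq
    omega
  | cons x c' ih =>
    intro rest out a k h0 hkb heq
    simp only [List.length_cons] at heq
    rw [List.cons_append, List.foldl_cons]
    by_cases hk : k + 1 = b
    · have hc' : c' = [] := by
        have hlen0 : (c'.length : Int) = 0 := by push_cast at heq; omega
        exact List.eq_nil_of_length_eq_zero (by exact_mod_cast hlen0)
      subst hc'
      rw [show pvStepB b (out, a, k) x = (out ++ [a * 2 + x], 0, 0) by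
        unfold pvStepB
        rw [if_pos hk]]
      simp [pvHorner]
    · have hk1 : k + 1 < b := by push_cast at heq ⊢; omega
      rw [show pvStepB b (out, a, k) x = (out, a * 2 + x, k + 1) by
        unfold pvStepB
        rw [if_neg hk]]
      rw [ih rest out (a * 2 + x) (k + 1) (by omega) hk1 (by push_cast at heq ⊢; omega)]
      rw [pvHorner_cons]

lemma pvB_gen (b : Int) (hb : 0 < b) : ∀ (N : Nat) (l : List Int), l.length ≤ N → l ≠ [] →
    ∀ out : List Int,
    (let st := l.foldl (pvStepB b) (out, 0, 0);
     if st.2.2 ≠ 0 then (st.1 ++ [st.2.1 * 2 ^ (b - st.2.2).toNat], b - st.2.2) else (st.1, 0))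
      = (out ++ (pvSpec b l).1, (pvSpec b l).2) := by
  intro N
  induction N with
  | zero =>
    intro l hlen hl out
    exact absurd (List.eq_nil_of_length_eq_zero (by omega)) hl
  | succ n ih =>
    intro l hlen hl out
    have hlpos : 0 < l.length := List.length_pos_of_ne_nil hl
    by_cases h1 : (l.length : Int) < b
    · rw [pvFoldB_partial b l out 0 0 le_rfl (by omega)]
      rw [pvSpec, if_neg hl, if_neg (show ¬ b ≤ 0 by omega), if_pos h1]
      have hne : ((l.length : Int)) ≠ 0 := by omega
      simp [hl]
    · by_cases h2 : (l.length : Int) = b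
      · have hfull := pvFoldB_full b l [] out 0 0 le_rfl hb (by omega)
        rw [List.append_nil] at hfull
        rw [hfull]
        simp only [List.foldl_nil]
        rw [if_neg (show ¬ ((out ++ [pvHorner 0 l], (0 : Int), (0 : Int)).2.2 ≠ 0) by simp)]
        rw [pvSpec, if_neg hl, if_neg (show ¬ b ≤ 0 by omega), if_neg h1, if_pos h2]
      · have hbl : b < (l.length : Int) := by omega
        have htake : ((l.take b.toNat).length : Int) = b := by
          simp only [List.length_take]
          omega
        have hdrop : l.drop b.toNat ≠ [] := by
          intro hh
          have := congrArg List.length hh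
          simp only [List.length_drop, List.length_nil] at this
          omega
        have hfull := pvFoldB_full b (l.take b.toNat) (l.drop b.toNat) out 0 0 le_rfl hb (by omega)
        rw [List.take_append_drop] at hfull
        rw [hfull]
        rw [ih (l.drop b.toNat) (by simp only [List.length_drop]; omega) hdrop
          (out ++ [pvHorner 0 (l.take b.toNat)])]
        have hspec : pvSpec b l
            = (pvHorner 0 (l.take b.toNat) :: (pvSpec b (l.drop b.toNat)).1,
               (pvSpec b (l.drop b.toNat)).2) := by
          rw [pvSpec, if_neg hl, if_neg (show ¬ b ≤ 0 by omega), if_neg h1, if_neg h2]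
        rw [hspec]
        simp

lemma pvB_eq (l : List Int) (b : Int) (hb : 0 < b) (hl : l ≠ []) :
    number_into_block_alt l b = pvSpec b l := by
  have h := pvB_gen b hb l.length l le_rfl hl []
  simp only [List.nil_append] at h
  exact h

-- ===== VERDICT (by name: the statement is the Claim_ definition above) =====
theorem number_into_block_spec : Claim_equal_number_into_block := by
  intro l b _ hpre
  obtain ⟨hb, hl⟩ := hpre
  show number_into_block l b = number_into_block_alt l b
  rw [pvA_eq l b (by omega) hl, pvB_eq l b (by omega) hl]
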